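-- pv_equiv track=rewrite | github.com/ThalesGroup/agilab | src/agilab/workflow_runtime_contract.py | _unit_ids_by_status
-- ===== SOURCE A (Python) =====
-- from typing import Any, Mapping, Sequence
--
-- RUNNABLE_STATUS = "runnable"
--
-- BLOCKED_STATUS = "blocked"
--
-- RUNNING_STATUS = "running"
--
-- COMPLETED_STATUS = "completed"
--
-- FAILED_STATUS = "failed"
--
-- def _unit_ids_by_status(units: Sequence[Mapping[str, Any]]) -> dict[str, list[str]]:
--     buckets = {
--         RUNNABLE_STATUS: [],
--         BLOCKED_STATUS: [],
--         RUNNING_STATUS: [],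
--         COMPLETED_STATUS: [],
--         FAILED_STATUS: [],
--     }
--     for unit in units:
--         unit_id = str(unit.get("id", "") or "")
--         status = str(unit.get("dispatch_status", "") or "").strip().lower()
--         if unit_id and status in buckets:
--             buckets[status].append(unit_id)
--     for values in buckets.values():
--         values.sort()
--     return buckets
-- ===== SOURCE B (Python) =====
-- def _unit_ids_by_status(units):
--     statuses = ("runnable", "blocked", "running", "completed", "failed")
--     pairs = []
--     for unit in units:
--         unit_id = str(unit.get("id", "") or "")
--         status = str(unit.get("dispatch_status", "") or "").strip().lower()
--         if unit_id and status in statuses: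
--             pairs.append((status, unit_id))
--     pairs.sort(key=lambda pair: pair[1])
--     buckets = {status: [] for status in statuses}
--     for status, unit_id in pairs:
--         buckets[status].append(unit_id)
--     return buckets
-- ===== Notes on version B (the rewrite author's own statement) =====
-- stated objective: alternative
-- what changed: Instead of appending into five buckets and then sorting each bucket, B collects the valid (status, id) pairs into one flat list, sorts that list once by id, and distributes it in a single pass into pre-initialized buckets, so the buckets come out sorted without any per-bucket sort.
import Mathlib
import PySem

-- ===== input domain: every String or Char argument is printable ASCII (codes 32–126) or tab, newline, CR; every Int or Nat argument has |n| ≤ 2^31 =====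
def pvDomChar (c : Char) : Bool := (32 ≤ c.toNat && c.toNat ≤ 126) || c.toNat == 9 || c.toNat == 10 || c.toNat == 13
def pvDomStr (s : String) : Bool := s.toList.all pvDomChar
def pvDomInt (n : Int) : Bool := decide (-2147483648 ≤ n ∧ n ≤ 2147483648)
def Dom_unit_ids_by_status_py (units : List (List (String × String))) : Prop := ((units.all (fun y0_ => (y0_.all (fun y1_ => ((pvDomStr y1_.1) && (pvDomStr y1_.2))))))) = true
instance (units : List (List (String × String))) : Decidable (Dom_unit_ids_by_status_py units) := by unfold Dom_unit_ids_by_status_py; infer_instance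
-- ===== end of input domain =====

-- B replaces A's five append-then-sort buckets by one flat list of (status, id) pairs sorted once
-- by id and distributed in a single pass into pre-initialized buckets (objective: alternative).

-- ===== PORT A =====
def unit_ids_by_status_py (units : List (List (String × String))) : List (String × List String) :=
  let buckets0 : PySem.Dict String (List String) :=
    PySem.Dict.mk [("runnable", []), ("blocked", []), ("running", []), ("completed", []), ("failed", [])]
  let buckets := units.foldl (fun b unit =>
    -- str(x or "") is the identity on strings (x falsy iff x == "")
    let unit_id := (PySem.Dict.mk unit).getD "id" ""
    let status := PySem.Str.lower (PySem.Str.strip ((PySem.Dict.mk unit).getD "dispatch_status" ""))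
    if unit_id != "" && b.contains status then b.modify status [] (· ++ [unit_id]) else b) buckets0
  -- 'for values in buckets.values(): values.sort()' sorts each value in place
  (buckets.items.map (fun p => (p.1, PySem.List.sorted p.2 (fun x => x) false)))

-- ===== PORT B =====
def unit_ids_by_status_py_alt (units : List (List (String × String))) : List (String × List String) :=
  let statuses : List String := ["runnable", "blocked", "running", "completed", "failed"]
  let pairs := units.foldl (fun acc unit =>
    let unit_id := (PySem.Dict.mk unit).getD "id" ""
    let status := PySem.Str.lower (PySem.Str.strip ((PySem.Dict.mk unit).getD "dispatch_status" ""))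
    if unit_id != "" && statuses.contains status then acc ++ [(status, unit_id)] else acc) []
  let spairs := PySem.List.sorted pairs (fun pair => pair.2) false
  let buckets0 : PySem.Dict String (List String) := PySem.Dict.mk (statuses.map (fun s => (s, [])))
  let buckets := spairs.foldl (fun d p => d.modify p.1 [] (· ++ [p.2])) buckets0
  buckets.items

-- ===== PRECONDITION & SPEC =====
def Spec_unit_ids_by_status_py (units : List (List (String × String))) (out : List (String × List String)) : Prop := out = unit_ids_by_status_py_alt units
instance (units : List (List (String × String))) (out : List (String × List String)) : Decidable (Spec_unit_ids_by_status_py units out) := by unfold Spec_unit_ids_by_status_py; infer_instance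

-- ===== CLAIM (what is proved, stated in full; the proofs are below) =====
def Claim_equal_unit_ids_by_status_py : Prop := ∀ (units : List (List (String × String))), Dom_unit_ids_by_status_py units → Spec_unit_ids_by_status_py units (unit_ids_by_status_py units)

-- ===== LEMMAS AND PROOFS =====

def pvStatuses : List String := ["runnable", "blocked", "running", "completed", "failed"]

def pvSt (unit : List (String × String)) : String :=
  PySem.Str.lower (PySem.Str.strip ((PySem.Dict.mk unit).getD "dispatch_status" ""))

def pvId (unit : List (String × String)) : String := (PySem.Dict.mk unit).getD "id" ""

def pvOk (unit : List (String × String)) : Bool :=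
  pvId unit != "" && pvStatuses.contains (pvSt unit)

def pvPairs (units : List (List (String × String))) : List (String × String) :=
  (units.filter pvOk).map (fun u => (pvSt u, pvId u))

def pvInit : PySem.Dict String (List String) :=
  PySem.Dict.mk [("runnable", []), ("blocked", []), ("running", []), ("completed", []), ("failed", [])]

-- A's accumulation loop equals the modify-fold over the flat pair list, for any dict whose key set is the five statuses.
theorem pvA_fold (units : List (List (String × String))) (d : PySem.Dict String (List String))
    (h : ∀ s, d.contains s = pvStatuses.contains s) :
    units.foldl (fun b unit =>
      let unit_id := (PySem.Dict.mk unit).getD "id" ""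
      let status := PySem.Str.lower (PySem.Str.strip ((PySem.Dict.mk unit).getD "dispatch_status" ""))
      if unit_id != "" && b.contains status then b.modify status [] (· ++ [unit_id]) else b) d
    = (pvPairs units).foldl (fun d p => d.modify p.1 [] (· ++ [p.2])) d := by
  induction units generalizing d with
  | nil => simp [pvPairs]
  | cons u rest ih =>
    simp only [List.foldl_cons, pvPairs]
    by_cases hok : pvOk u = true
    · have h1 : (pvId u != "") = true ∧ pvStatuses.contains (pvSt u) = true := by
        simpa [pvOk, Bool.and_eq_true] using hok
      have hid : ((PySem.Dict.mk u).getD "id" "" != "") = true := by simpa [pvId] using h1.1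
      have hc' : d.contains (PySem.Str.lower (PySem.Str.strip ((PySem.Dict.mk u).getD "dispatch_status" ""))) = true := by
        have := h1.2; rw [← h (pvSt u)] at this; simpa [pvSt] using this
      rw [List.filter_cons_of_pos hok, List.map_cons, List.foldl_cons]
      simp only [hid, hc', Bool.and_self, if_true]
      have hkeys : ∀ s, (d.modify (pvSt u) [] (· ++ [pvId u])).contains s = pvStatuses.contains s := by
        intro s
        rw [PySem.Dict.contains_modify, h]
        rcases eq_or_ne s (pvSt u) with rfl | hne
        · have hm := h1.2
          simp at hm
          simp [hm]
        · simp [hne]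
      have := ih (d.modify (pvSt u) [] (· ++ [pvId u])) hkeys
      simpa [pvSt, pvId] using this
    · have hcond : (pvId u != "" && d.contains (pvSt u)) = false := by
        rw [h]; simpa [pvOk] using hok
      have hcond' : ((PySem.Dict.mk u).getD "id" "" != "" &&
          d.contains (PySem.Str.lower (PySem.Str.strip ((PySem.Dict.mk u).getD "dispatch_status" "")))) = false := by
        simpa [pvSt, pvId] using hcond
      rw [List.filter_cons_of_neg (by simpa using hok)]
      simp only [hcond', Bool.false_eq_true, if_false]
      exact ih d h

-- B's pair-collecting loop produces pvPairs.
theorem pvB_pairs (units : List (List (String × String))) :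
    units.foldl (fun acc unit =>
      let unit_id := (PySem.Dict.mk unit).getD "id" ""
      let status := PySem.Str.lower (PySem.Str.strip ((PySem.Dict.mk unit).getD "dispatch_status" ""))
      if unit_id != "" && pvStatuses.contains status then acc ++ [(status, unit_id)] else acc) []
    = pvPairs units := by
  have := PySem.List.foldl_append_if (l := units) (acc := ([] : List (String × String)))
    (p := pvOk) (f := fun u => (pvSt u, pvId u))
  simpa [pvOk, pvSt, pvId, pvPairs] using this

-- the grouping-by-key step: filtering the id-sorted pair list per status yields each bucket already sorted
theorem pvKey_sorted (ps : List (String × String)) (s : String) :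
    PySem.List.sorted ((ps.filter (fun p => p.1 == s)).map (fun p => p.2)) (fun x => x) false
    = ((PySem.List.sorted ps (fun pair => pair.2) false).filter (fun p => p.1 == s)).map (fun p => p.2) := by
  apply PySem.List.sorted_id_eq_of_perm_of_pairwise
  · exact ((PySem.List.sorted_perm ps (fun pair => pair.2) false).filter _).map _
  · have hpw : (PySem.List.sorted ps (fun pair => pair.2) false).Pairwise
        (fun a b => a.2 ≤ b.2) := PySem.List.sorted_pairwise ps (fun pair => pair.2)
    exact (List.pairwise_map).2 ((hpw.filter _).imp (fun h => h))

theorem pvContains_fold (l : List (String × String)) (d : PySem.Dict String (List String))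
    (hsub : ∀ p ∈ l, p.1 ∈ d.keys) :
    (l.foldl (fun d p => d.modify p.1 [] (· ++ [p.2])) d).keys = d.keys := by
  rw [PySem.Dict.keys_foldl_modify_key]
  rw [PySem.Set.update_eq_append_filter]
  have hnil : (PySem.Set.ofList (l.map Prod.fst)).filter (fun y => !(PySem.Set.contains d.keys y)) = [] := by
    rw [List.filter_eq_nil_iff]
    intro a ha
    have ham : a ∈ l.map Prod.fst := (PySem.Set.mem_ofList _ _).1 ha
    obtain ⟨p, hp, rfl⟩ := List.mem_map.1 ham
    simp [PySem.Set.contains, hsub p hp]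
  rw [hnil, List.append_nil]

theorem pvNodup_fold (l : List (String × String)) :
    (l.foldl (fun d p => d.modify p.1 [] (· ++ [p.2])) pvInit).keys.Nodup := by
  apply PySem.Dict.nodup_keys_foldl_modify_key
  decide

theorem pvItems (l : List (String × String)) (hsub : ∀ p ∈ l, p.1 ∈ pvInit.keys) :
    (l.foldl (fun d p => d.modify p.1 [] (· ++ [p.2])) pvInit).items
    = pvStatuses.map (fun s => (s, (l.filter (fun p => p.1 == s)).map (fun p => p.2))) := by
  rw [PySem.Dict.items_eq_map_keys _ (pvNodup_fold l) []]
  rw [pvContains_fold l pvInit hsub]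
  have hkeys : pvInit.keys = pvStatuses := by decide
  rw [hkeys]
  refine List.map_congr_left (fun s hs => ?_)
  rw [PySem.Dict.getD_foldl_modify_append]
  have h0 : pvInit.getD s [] = [] := by fin_cases hs <;> decide
  rw [h0, List.nil_append]

theorem pvPairs_fst (units : List (List (String × String))) :
    ∀ p ∈ pvPairs units, p.1 ∈ pvInit.keys := by
  intro p hp
  obtain ⟨u, hu, rfl⟩ := List.mem_map.1 hp
  have hok : pvOk u = true := (List.mem_filter.1 hu).2
  have hc : pvStatuses.contains (pvSt u) = true := by
    simp only [pvOk, Bool.and_eq_true] at hok; exact hok.2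
  have : pvSt u ∈ pvStatuses := by simpa using hc
  simpa [pvInit, PySem.Dict.keys, pvStatuses] using this

-- ===== VERDICT (by name: the statement is the Claim_ definition above) =====
theorem unit_ids_by_status_py_spec : Claim_equal_unit_ids_by_status_py := by
  intro units _
  unfold Spec_unit_ids_by_status_py unit_ids_by_status_py unit_ids_by_status_py_alt
  simp only []
  have hB : List.foldl (fun acc unit =>
      let unit_id := (PySem.Dict.mk unit).getD "id" ""
      let status := PySem.Str.lower (PySem.Str.strip ((PySem.Dict.mk unit).getD "dispatch_status" ""))
      if unit_id != "" && (["runnable", "blocked", "running", "completed", "failed"] : List String).contains status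
      then acc ++ [(status, unit_id)] else acc) [] units = pvPairs units := by
    simpa [pvStatuses] using pvB_pairs units
  rw [hB]
  have hpvI : PySem.Dict.mk [("runnable", ([] : List String)), ("blocked", []), ("running", []), ("completed", []), ("failed", [])] = pvInit := rfl
  rw [hpvI]
  have hA := pvA_fold units pvInit (fun s => by
    simp only [pvInit, pvStatuses, PySem.Dict.contains_mk, List.contains_eq_mem]
    rw [Bool.eq_iff_iff]
    simp only [decide_eq_true_eq, List.mem_cons, List.not_mem_nil, or_false, List.any_cons,
      List.any_nil, Bool.or_false, Bool.or_eq_true, beq_iff_eq]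
    constructor
    · rintro (rfl | rfl | rfl | rfl | rfl) <;> simp
    · rintro (rfl | rfl | rfl | rfl | rfl) <;> simp)
  rw [hA]
  have hinitB : PySem.Dict.mk ((["runnable", "blocked", "running", "completed", "failed"] : List String).map
      (fun s => (s, ([] : List String)))) = pvInit := by decide
  rw [hinitB]
  rw [pvItems (pvPairs units) (pvPairs_fst units)]
  have hsubS : ∀ p ∈ PySem.List.sorted (pvPairs units) (fun pair => pair.2) false, p.1 ∈ pvInit.keys := by
    intro p hp
    exact pvPairs_fst units p ((PySem.List.mem_sorted _ _ _ _).1 hp)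
  rw [pvItems _ hsubS]
  rw [List.map_map]
  refine List.map_congr_left (fun s _ => ?_)
  simp only [Function.comp]
  rw [pvKey_sorted (pvPairs units) s]
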